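-- pv_equiv track=rewrite | github.com/antonkozhukhov/new_project | main.py | resN
-- ===== SOURCE A (Python) =====
-- def resN(arr, N):
--     resn = []
--     for i in range(len(arr) - N):
--         k = 0
--         res = []
--         while k < N:
--             res += arr[i + k]
--             k += 1
--         resn.append(res)
--     return resn
-- ===== SOURCE B (Python) =====
-- def resN(arr, N):
--     # Flatten once, index windows by a prefix-offset table, emit each window as one slice.
--     F = []
--     off = [0]
--     for row in arr:
--         F.extend(row)
--         off.append(off[-1] + len(row))
--     return [F[off[i]:off[i + N]] for i in range(len(arr) - N)]
-- ===== Notes on version B (the rewrite author's own statement) =====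
-- stated objective: alternative
-- what changed: B flattens the whole input once and builds a prefix-offset table, then emits each window as a single slice F[off[i]:off[i+N]], replacing A's per-window re-concatenation of N sublists; Pre_ excludes N < 0, where A's range bound accidentally emits len(arr)+|N| empty windows (an artefact of the unrun while loop) and B's natural slicing indexes off the offset table.
-- outside the precondition, e.g. on resN([[1]], -2): A returns [[], [], []], B raises IndexError
import Mathlib
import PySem

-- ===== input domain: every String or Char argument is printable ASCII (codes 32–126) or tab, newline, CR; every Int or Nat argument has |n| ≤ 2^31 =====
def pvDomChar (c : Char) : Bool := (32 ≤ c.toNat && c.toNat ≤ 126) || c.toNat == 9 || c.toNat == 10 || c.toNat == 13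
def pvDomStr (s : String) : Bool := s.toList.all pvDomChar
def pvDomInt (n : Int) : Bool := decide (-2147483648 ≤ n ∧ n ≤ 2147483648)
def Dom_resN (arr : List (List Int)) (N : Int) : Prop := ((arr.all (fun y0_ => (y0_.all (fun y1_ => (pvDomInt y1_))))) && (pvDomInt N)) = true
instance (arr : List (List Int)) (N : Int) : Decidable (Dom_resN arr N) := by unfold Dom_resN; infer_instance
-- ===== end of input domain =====

-- B flattens the input once and builds a prefix-offset table, emitting each window as one
-- slice of the flat list (objective: alternative, similar cost).


-- ===== PORT A =====
-- while k < N: res += arr[i + k]; k += 1   — fuel (N - k).toNat only bounds the loop;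
-- the guard k < N is Python's, and indices are always in range when the body runs.
def resN_while (arr : List (List Int)) (N i : Int) : Nat → Int → List Int → List Int
  | 0, _, res => res
  | fuel + 1, k, res =>
    if k < N then resN_while arr N i fuel (k + 1) (res ++ PySem.List.pyGetD arr (i + k) [])
    else res

def resN (arr : List (List Int)) (N : Int) : List (List Int) :=
  (PySem.List.pyRange 0 ((arr.length : Int) - N) 1).foldl
    (fun resn i => resn ++ [resN_while arr N i N.toNat 0 []]) []

-- ===== PORT B =====
def resN_alt (arr : List (List Int)) (N : Int) : List (List Int) :=
  -- F, off built in one pass: F flat, off[j] = total length of arr[0..j-1]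
  let p : List Int × List Int :=
    arr.foldl
      (fun (p : List Int × List Int) row =>
        (p.1 ++ row, p.2 ++ [PySem.List.pyGetD p.2 (-1) 0 + (row.length : Int)]))
      ([], [0])
  (PySem.List.pyRange 0 ((arr.length : Int) - N) 1).map
    (fun i => PySem.List.slice p.1 (some (PySem.List.pyGetD p.2 i 0))
                                  (some (PySem.List.pyGetD p.2 (i + N) 0)))

-- ===== PRECONDITION & SPEC =====
-- Pre_ excludes N < 0, on which A's range bound accidentally emits len(arr)+|N| empty
-- windows (the while body never runs) while B's slicing indexes off the offset table.
def Pre_resN (arr : List (List Int)) (N : Int) : Prop := 0 ≤ N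
instance (arr : List (List Int)) (N : Int) : Decidable (Pre_resN arr N) := by unfold Pre_resN; infer_instance
def pvWitness_resN : List (List Int) × Int := ([[1], [2, 3], [4]], 1)

def Spec_resN (arr : List (List Int)) (N : Int) (out : List (List Int)) : Prop := out = resN_alt arr N
instance (arr : List (List Int)) (N : Int) (out : List (List Int)) : Decidable (Spec_resN arr N out) := by unfold Spec_resN; infer_instance

-- ===== CLAIM (what is proved, stated in full; the proofs are below) =====
def Claim_equal_resN : Prop := ∀ (arr : List (List Int)) (N : Int), Dom_resN arr N → Pre_resN arr N → Spec_resN arr N (resN arr N)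

-- ===== LEMMAS AND PROOFS =====

-- A's inner while loop appends exactly the flattening of arr[i+k : i+N].
theorem while_spec (arr : List (List Int)) (N i : Int) (hi : 0 ≤ i)
    (hN : i + N ≤ (arr.length : Int)) :
    ∀ (fuel : Nat) (k : Int) (res : List Int), 0 ≤ k → (N - k).toNat = fuel →
      resN_while arr N i fuel k res = res ++ ((arr.drop (i + k).toNat).take fuel).flatten := by
  intro fuel
  induction fuel with
  | zero => intro k res _ _; simp [resN_while]
  | succ fuel ih =>
    intro k res hk hfuel
    have hkN : k < N := by omega
    have hidx : (i + k).toNat < arr.length := by omega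
    have h1 : (i + (k + 1)).toNat = (i + k).toNat + 1 := by omega
    rw [resN_while, if_pos hkN, ih (k + 1) _ (by omega) (by omega),
        PySem.List.pyGetD_eq_getElem arr [] (by omega) (by omega), h1,
        List.drop_eq_getElem_cons hidx, List.take_succ_cons]
    simp [List.append_assoc]

-- B's fold builds the flat list and the prefix-offset table.
theorem fold_spec (arr : List (List Int)) :
    ∀ (F : List Int) (off : List Int) (c : Int),
    arr.foldl
      (fun (p : List Int × List Int) row =>
        (p.1 ++ row, p.2 ++ [PySem.List.pyGetD p.2 (-1) 0 + (row.length : Int)]))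
      (F, off ++ [c]) =
      (F ++ arr.flatten,
       (off ++ [c]) ++ (List.range arr.length).map
          (fun j => c + (((arr.take (j + 1)).map List.length).sum : Int))) := by
  induction arr with
  | nil => intro F off c; simp
  | cons row t ih =>
    intro F off c
    simp only [List.foldl_cons, PySem.List.pyGetD_neg_one_append_singleton]
    rw [show (off ++ [c]) ++ [c + (row.length : Int)] = (off ++ [c]) ++ [c + (row.length : Int)] from rfl,
        ih (F ++ row) (off ++ [c]) (c + (row.length : Int))]
    simp [List.range_succ_eq_map, List.map_map, Function.comp, List.append_assoc, add_assoc]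

-- the offset table as a pure list
def offList (arr : List (List Int)) : List Int :=
  (0 : Int) :: (List.range arr.length).map
    (fun j => (((arr.take (j + 1)).map List.length).sum : Int))

theorem offList_get (arr : List (List Int)) (t : Int) (h0 : 0 ≤ t)
    (h1 : t ≤ (arr.length : Int)) :
    PySem.List.pyGetD (offList arr) t 0 = (((arr.take t.toNat).flatten.length : Nat) : Int) := by
  have hlen : (offList arr).length = arr.length + 1 := by simp [offList]
  rw [PySem.List.pyGetD_eq_getElem _ _ h0 (by rw [hlen]; push_cast; omega)]
  rcases Nat.eq_zero_or_eq_succ_pred t.toNat with hz | hs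
  · simp [offList, hz]
  · obtain ⟨j, hj⟩ : ∃ j, t.toNat = j + 1 := ⟨t.toNat - 1, by omega⟩
    have hjlt : j < arr.length := by omega
    simp only [hj]
    simp [offList, List.length_flatten]

theorem window_eq (arr : List (List Int)) (i' n : Nat) :
    List.take ((arr.take (i' + n)).flatten.length - (arr.take i').flatten.length)
      (List.drop (arr.take i').flatten.length arr.flatten) =
      ((arr.drop i').take n).flatten := by
  have hsplit : arr.flatten = (arr.take i').flatten ++ (arr.drop i').flatten := by
    rw [← List.flatten_append, List.take_append_drop]
  have htk : arr.take (i' + n) = arr.take i' ++ (arr.drop i').take n := by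
    rw [List.take_add]
  have hdrop : List.drop (arr.take i').flatten.length arr.flatten = (arr.drop i').flatten := by
    rw [hsplit, List.drop_left]
  rw [hdrop, htk]
  have hsplit2 : (arr.drop i').flatten =
      ((arr.drop i').take n).flatten ++ ((arr.drop i').drop n).flatten := by
    rw [← List.flatten_append, List.take_append_drop]
  rw [List.flatten_append, List.length_append, Nat.add_sub_cancel_left, hsplit2, List.take_left]

theorem resN_spec : Claim_equal_resN := by
  intro arr N _ hNpre
  have hN : 0 ≤ N := hNpre
  show resN arr N = resN_alt arr N
  unfold resN resN_alt
  have hfold := fold_spec arr [] [] 0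
  simp only [List.nil_append] at hfold
  simp only [hfold]
  rw [PySem.List.foldl_append_singleton_eq_map]
  simp only [List.nil_append]
  apply List.map_congr_left
  intro i hi
  rw [PySem.List.mem_pyRange_one] at hi
  obtain ⟨hi0, hilt⟩ := hi
  have hoff : (([(0:Int)] ++ (List.range arr.length).map
      (fun j => 0 + (((arr.take (j + 1)).map List.length).sum : Int)))) = offList arr := by
    simp [offList]
  rw [hoff, offList_get arr i hi0 (by omega), offList_get arr (i + N) (by omega) (by omega)]
  rw [PySem.List.slice_natCast]
  have h1 : (i + N).toNat = i.toNat + N.toNat := by omega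
  rw [h1, window_eq arr i.toNat N.toNat]
  rw [while_spec arr N i hi0 (by omega) N.toNat 0 [] le_rfl (by omega)]
  simp
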